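-- pv_equiv track=rewrite | github.com/shrey199325/LeetCodeSolution | InterviewQuestions/Collins/interview.py | map_sorter
-- ===== SOURCE A (Python) =====
-- def merger(arr1, arr2):
--     i = j = 0
--     output = []
--     while i < len(arr1) and j < len(arr2):
--         if arr1[i] <= arr2[j]:
--             output.append(arr1[i])
--             i += 1
--         else:
--             output.append(arr2[j])
--             j += 1
--     while i < len(arr1):
--         output.append(arr1[i])
--         i += 1
--     while j < len(arr2):
--         output.append(arr2[j])
--         j += 1
--     return output
--
-- def merge_sort(arr):
--     if len(arr) == 1:
--         return arr
--     m = len(arr) // 2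
--     sorted_arr1 = merge_sort(arr[:m])
--     sorted_arr2 = merge_sort(arr[m:])
--     return merger(sorted_arr1, sorted_arr2)
--
-- def map_sorter(map):
--     arr = []
--     for key in map.keys():
--         while map[key] > 0:
--             arr.append(key)
--             map[key] -= 1
--     arr = merge_sort(arr)
--     return arr
-- ===== SOURCE B (Python) =====
-- def map_sorter(map):
--     # B: sort the K distinct keys, then expand each by its count (A expands first,
--     # then merge-sorts the whole N-element array). Return value only: A zeroes out
--     # the dict's values in place, B does not mutate its argument.
--     out = []
--     for key in sorted(map):
--         out += [key] * map[key]
--     return out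
-- ===== Notes on version B (the rewrite author's own statement) =====
-- stated objective: faster
-- what changed: Instead of expanding every key by its count into an N-element array and merge-sorting it with a hand-written O(N log N) merge sort, B sorts only the K distinct keys and then expands each key by its count in one pass; on all-nonpositive-count dicts (excluded by Pre_) A's merge_sort recurses forever (RecursionError) while B returns [].
-- outside the precondition, e.g. on map_sorter({}): A raises RecursionError, B returns []; on map_sorter({5: 0}): A raises RecursionError, B returns []
import Mathlib
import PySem

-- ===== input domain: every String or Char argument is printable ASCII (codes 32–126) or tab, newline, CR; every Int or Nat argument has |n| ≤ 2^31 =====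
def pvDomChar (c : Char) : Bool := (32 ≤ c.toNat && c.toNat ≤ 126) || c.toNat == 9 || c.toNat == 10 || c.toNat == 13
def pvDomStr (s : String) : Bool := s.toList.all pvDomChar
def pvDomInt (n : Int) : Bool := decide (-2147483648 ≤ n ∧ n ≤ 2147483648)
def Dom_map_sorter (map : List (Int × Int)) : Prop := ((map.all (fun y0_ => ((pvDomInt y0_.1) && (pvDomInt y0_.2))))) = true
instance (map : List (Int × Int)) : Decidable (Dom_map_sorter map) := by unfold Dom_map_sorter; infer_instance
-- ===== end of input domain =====

-- B sorts only the K distinct keys and then expands each by its count, instead of A's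
-- expand-then-merge-sort over the whole N-element array (return value only: A zeroes the
-- dict's values in place, B does not mutate its argument).

-- ===== PORT A =====
-- A-side helper: 'merger' — the two-pointer merge of two lists
def mergerA : List Int → List Int → List Int
  | [], ys => ys
  | x :: xs, [] => x :: xs
  | x :: xs, y :: ys =>
    if x ≤ y then x :: mergerA xs (y :: ys) else y :: mergerA (x :: xs) ys

-- A-side helper: 'merge_sort'.  Python's merge_sort recurses forever on [] (RecursionError,
-- excluded by Pre_), so a fuel counter (= arr.length at the call site, enough for every
-- nonempty arr) makes the port total; the fuel-0 branch is unreachable inside Pre_.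
-- arr[:m] / arr[m:] with 0 ≤ m ≤ len(arr) are exactly take/drop (PySem.List.slice_to / slice_from).
def mergeSortA (fuel : Nat) (arr : List Int) : List Int :=
  match fuel with
  | 0 => arr
  | fuel + 1 =>
    if arr.length == 1 then arr
    else
      let m := arr.length / 2
      mergerA (mergeSortA fuel (arr.take m)) (mergeSortA fuel (arr.drop m))

-- A-side helper: the 'while map[key] > 0: arr.append(key); map[key] -= 1' loop for one key
-- (keys are distinct, so the decrements of map[key] never affect another iteration)
def expandA (key : Int) (n : Int) : List Int :=
  if _h : 0 < n then key :: expandA key (n - 1) else []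
termination_by n.toNat
decreasing_by omega

def map_sorter (map : List (Int × Int)) : List Int :=
  let d := PySem.Dict.ofList map
  let arr := d.keys.foldl (fun acc k => acc ++ expandA k (d.getD k 0)) []
  mergeSortA arr.length arr

-- ===== PORT B =====
-- [key] * c is List.replicate c.toNat key (Python list repetition yields [] for c ≤ 0)
def map_sorter_alt (map : List (Int × Int)) : List Int :=
  let d := PySem.Dict.ofList map
  (PySem.List.sorted d.keys (fun k => k) false).foldl
    (fun acc k => acc ++ List.replicate (d.getD k 0).toNat k) []

-- ===== PRECONDITION & SPEC =====
-- Pre_ excludes exactly the dicts whose values are all ≤ 0 (including the empty dict):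
-- there the expanded array is empty and A's merge_sort recurses forever (RecursionError).
def Pre_map_sorter (map : List (Int × Int)) : Prop :=
  ∃ p ∈ (PySem.Dict.ofList map).items, 0 < p.2
instance (map : List (Int × Int)) : Decidable (Pre_map_sorter map) := by
  unfold Pre_map_sorter; infer_instance
def pvWitness_map_sorter : (List (Int × Int)) := [(1, 2), (0, 1)]

def Spec_map_sorter (map : List (Int × Int)) (out : List Int) : Prop := out = map_sorter_alt map
instance (map : List (Int × Int)) (out : List Int) : Decidable (Spec_map_sorter map out) := by unfold Spec_map_sorter; infer_instance

-- ===== CLAIM (what is proved, stated in full; the proofs are below) =====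
def Claim_equal_map_sorter : Prop := ∀ (map : List (Int × Int)), Dom_map_sorter map → Pre_map_sorter map → Spec_map_sorter map (map_sorter map)

-- ===== LEMMAS AND PROOFS =====

theorem expandA_eq (key n : Int) : expandA key n = List.replicate n.toNat key := by
  induction n using expandA.induct with
  | case1 n h ih =>
      rw [expandA, dif_pos h, ih]
      have : n.toNat = (n - 1).toNat + 1 := by omega
      rw [this, List.replicate_succ]
  | case2 n h =>
      rw [expandA, dif_neg h]
      have : n.toNat = 0 := by omega
      rw [this, List.replicate_zero]

theorem mergerA_perm (a b : List Int) : (mergerA a b).Perm (a ++ b) := by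
  induction a, b using mergerA.induct with
  | case1 ys => simp [mergerA]
  | case2 x xs => simp [mergerA]
  | case3 x xs y ys h ih =>
      rw [mergerA, if_pos h]
      simpa using ih.cons x
  | case4 x xs y ys h ih =>
      rw [mergerA, if_neg h]
      refine (ih.cons y).trans ?_
      simpa using (List.perm_middle (a := y) (l₁ := x :: xs) (l₂ := ys)).symm

theorem mem_mergerA {a b : List Int} {z : Int} (h : z ∈ mergerA a b) : z ∈ a ∨ z ∈ b := by
  have := (mergerA_perm a b).mem_iff.mp h
  simpa using this

theorem mergerA_pairwise (a b : List Int) (ha : a.Pairwise (· ≤ ·)) (hb : b.Pairwise (· ≤ ·)) :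
    (mergerA a b).Pairwise (· ≤ ·) := by
  induction a, b using mergerA.induct with
  | case1 ys => simpa [mergerA] using hb
  | case2 x xs => simpa [mergerA] using ha
  | case3 x xs y ys h ih =>
      rw [mergerA, if_pos h]
      rw [List.pairwise_cons] at ha ⊢
      refine ⟨?_, ih ha.2 hb⟩
      intro z hz
      rcases mem_mergerA hz with hz | hz
      · exact ha.1 z hz
      · rcases List.mem_cons.mp hz with rfl | hz
        · exact h
        · exact le_trans h ((List.pairwise_cons.mp hb).1 z hz)
  | case4 x xs y ys h ih =>
      rw [mergerA, if_neg h]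
      rw [List.pairwise_cons] at hb ⊢
      refine ⟨?_, ih ha hb.2⟩
      intro z hz
      have hyx : y ≤ x := le_of_lt (lt_of_not_ge h)
      rcases mem_mergerA hz with hz | hz
      · rcases List.mem_cons.mp hz with rfl | hz
        · exact hyx
        · exact le_trans hyx ((List.pairwise_cons.mp ha).1 z hz)
      · exact hb.1 z hz

theorem mergeSortA_spec (fuel : Nat) : ∀ (arr : List Int), arr.length ≤ fuel → arr ≠ [] →
    (mergeSortA fuel arr).Perm arr ∧ (mergeSortA fuel arr).Pairwise (· ≤ ·) := by
  induction fuel with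
  | zero =>
      intro arr hlen hne
      exact absurd (List.length_eq_zero_iff.mp (Nat.le_zero.mp hlen)) hne
  | succ fuel ih =>
      intro arr hlen hne
      by_cases h1 : arr.length = 1
      · rcases List.length_eq_one_iff.mp h1 with ⟨x, rfl⟩
        simp [mergeSortA]
      · have h2 : 2 ≤ arr.length := by
          have : arr.length ≠ 0 := by simpa using hne
          omega
        have hm1 : 1 ≤ arr.length / 2 := by omega
        have hm2 : arr.length / 2 < arr.length := by omega
        have hlt : (arr.take (arr.length / 2)).length ≤ fuel := by
          simp only [List.length_take]; omega
        have hld : (arr.drop (arr.length / 2)).length ≤ fuel := by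
          simp only [List.length_drop]; omega
        have hnt : arr.take (arr.length / 2) ≠ [] := by
          intro hc
          have := congrArg List.length hc
          simp only [List.length_take, List.length_nil] at this
          omega
        have hnd : arr.drop (arr.length / 2) ≠ [] := by
          intro hc
          have := congrArg List.length hc
          simp only [List.length_drop, List.length_nil] at this
          omega
        obtain ⟨pt, st⟩ := ih _ hlt hnt
        obtain ⟨pd, sd⟩ := ih _ hld hnd
        have heq : mergeSortA (fuel + 1) arr =
            mergerA (mergeSortA fuel (arr.take (arr.length / 2)))
                    (mergeSortA fuel (arr.drop (arr.length / 2))) := by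
          rw [mergeSortA]
          simp only [beq_iff_eq, if_neg h1]
        rw [heq]
        constructor
        · refine (mergerA_perm _ _).trans ?_
          refine (pt.append pd).trans ?_
          rw [List.take_append_drop]
        · exact mergerA_pairwise _ _ st sd

theorem blocks_pairwise (ks : List Int) (c : Int → Nat) (h : ks.Pairwise (· ≤ ·)) :
    (ks.flatMap (fun k => List.replicate (c k) k)).Pairwise (· ≤ ·) := by
  induction ks with
  | nil => simp
  | cons k ks ih =>
      rw [List.pairwise_cons] at h
      rw [List.flatMap_cons, List.pairwise_append]
      refine ⟨List.pairwise_replicate_of_refl, ih h.2, ?_⟩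
      intro x hx y hy
      obtain ⟨k2, hk2, hy2⟩ := List.mem_flatMap.mp hy
      rw [List.eq_of_mem_replicate hx, List.eq_of_mem_replicate hy2]
      exact h.1 k2 hk2

theorem map_sorter_alt_eq (map : List (Int × Int)) :
    map_sorter_alt map =
      (PySem.List.sorted (PySem.Dict.ofList map).keys (fun k => k) false).flatMap
        (fun k => List.replicate ((PySem.Dict.ofList map).getD k 0).toNat k) := by
  unfold map_sorter_alt
  rw [PySem.List.foldl_append_eq_flatMap]
  simp

theorem map_sorter_arr_eq (map : List (Int × Int)) :
    (PySem.Dict.ofList map).keys.foldl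
        (fun acc k => acc ++ expandA k ((PySem.Dict.ofList map).getD k 0)) [] =
      (PySem.Dict.ofList map).keys.flatMap
        (fun k => List.replicate (((PySem.Dict.ofList map).getD k 0)).toNat k) := by
  rw [PySem.List.foldl_append_eq_flatMap]
  simp only [List.nil_append]
  exact List.flatMap_congr (fun k _ => expandA_eq k _)

-- ===== VERDICT (by name: the statement is the Claim_ definition above) =====
theorem map_sorter_spec : Claim_equal_map_sorter := by
  intro map _ hpre
  unfold Spec_map_sorter
  have harr : map_sorter map =
      mergeSortA ((PySem.Dict.ofList map).keys.flatMap
          (fun k => List.replicate (((PySem.Dict.ofList map).getD k 0)).toNat k)).length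
        ((PySem.Dict.ofList map).keys.flatMap
          (fun k => List.replicate (((PySem.Dict.ofList map).getD k 0)).toNat k)) := by
    simp only [map_sorter, map_sorter_arr_eq]
  have hne : (PySem.Dict.ofList map).keys.flatMap
      (fun k => List.replicate (((PySem.Dict.ofList map).getD k 0)).toNat k) ≠ [] := by
    obtain ⟨p, hp, hpos⟩ := hpre
    have hnd : (PySem.Dict.ofList map).keys.Nodup := PySem.Dict.nodup_keys_ofList map
    have hk : p.1 ∈ (PySem.Dict.ofList map).keys :=
      PySem.Dict.mem_keys_of_mem_items _ hp
    have hv : (PySem.Dict.ofList map).getD p.1 0 = p.2 :=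
      PySem.Dict.getD_of_mem_items (PySem.Dict.ofList map) (by simpa using hp) hnd 0
    intro hc
    have hmem : p.1 ∈ (PySem.Dict.ofList map).keys.flatMap
        (fun k => List.replicate (((PySem.Dict.ofList map).getD k 0)).toNat k) := by
      refine List.mem_flatMap.mpr ⟨p.1, hk, ?_⟩
      rw [hv]
      exact List.mem_replicate.mpr ⟨by omega, rfl⟩
    rw [hc] at hmem
    exact absurd hmem (List.not_mem_nil)
  obtain ⟨hperm, hsort⟩ := mergeSortA_spec _ _ le_rfl hne
  rw [harr, map_sorter_alt_eq map]
  refine PySem.List.eq_of_perm_of_pairwise_le ?_ hsort ?_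
  · refine hperm.trans ?_
    exact (List.Perm.flatMap_right _ (PySem.List.sorted_perm (PySem.Dict.ofList map).keys _ _)).symm
  · exact blocks_pairwise _ _
      (by simpa using PySem.List.sorted_pairwise (PySem.Dict.ofList map).keys (fun k => k))
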